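-- pv_equiv track=rewrite | github.com/appleeatsapples-lang/SIRR | Engine/modules/nt_figures.py | _reduction_chain
-- ===== SOURCE A (Python) =====
-- def _reduction_chain(n: int) -> str:
--     """Build reduction chain string."""
--     x = abs(n)
--     if x <= 9:
--         return str(x)
--     steps = []
--     while x > 9:
--         x = sum(int(d) for d in str(x))
--         steps.append(str(x))
--     return "→".join(steps)
-- ===== SOURCE B (Python) =====
-- def _reduction_chain(n: int) -> str:
--     """Build reduction chain string (recursive decomposition instead of loop+join)."""
--     x = abs(n)
--     if x <= 9:
--         return str(x)
--
--     def go(x):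
--         s = sum(map(int, str(x)))
--         return str(s) if s <= 9 else str(s) + "\u2192" + go(s)
--
--     return go(x)
-- ===== Notes on version B (the rewrite author's own statement) =====
-- stated objective: alternative
-- what changed: Replaced the while-loop that accumulates a list of step strings and joins it at the end with a recursive helper that builds the chain string directly by concatenation.
import Mathlib
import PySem

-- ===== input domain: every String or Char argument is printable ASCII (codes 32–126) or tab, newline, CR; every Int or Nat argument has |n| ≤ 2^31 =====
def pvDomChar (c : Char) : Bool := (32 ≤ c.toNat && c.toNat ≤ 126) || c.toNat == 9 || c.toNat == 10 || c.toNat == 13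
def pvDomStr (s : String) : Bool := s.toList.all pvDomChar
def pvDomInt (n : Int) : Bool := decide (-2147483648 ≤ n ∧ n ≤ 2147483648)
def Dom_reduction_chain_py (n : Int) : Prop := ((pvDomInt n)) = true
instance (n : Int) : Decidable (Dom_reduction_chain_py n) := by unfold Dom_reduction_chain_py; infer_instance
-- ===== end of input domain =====

-- B replaces A's while-loop (accumulate step strings, join at the end) with a recursive helper
-- that builds the chain string directly by concatenation; same values, alternative decomposition.

-- ===== PORT A =====

-- int(d) for a single character d of str(x) (x ≥ 0: always a decimal digit, so int never raises;
-- the .getD 0 default is unreachable there)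
def pvDigitVal (d : Char) : Int := (PySem.Int.ofChars? [d]).getD 0

-- sum(int(d) for d in str(x))
def pvDigitSum (x : Int) : Int := ((PySem.Int.toChars x).map pvDigitVal).sum

-- A's while-loop; fuel is only a totality guard (the digit sum strictly decreases, so
-- fuel = x.toNat is never exhausted — proved below)
def pvLoopA (fuel : Nat) (x : Int) (steps : List String) : List String :=
  match fuel with
  | 0 => steps
  | fuel + 1 =>
    if 9 < x then
      let x' := pvDigitSum x
      pvLoopA fuel x' (steps ++ [PySem.Int.toStr x'])
    else steps

def reduction_chain_py (n : Int) : String :=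
  let x := |n|
  if x ≤ 9 then PySem.Int.toStr x
  else PySem.Str.join "→" (pvLoopA x.toNat x [])

-- ===== PORT B =====

-- B's recursive helper go(x); string concatenation ported exactly over List Char
-- (str(s) + "→" + go(s) = the concatenation of the character lists); fuel is only a
-- totality guard, never exhausted for fuel = x.toNat (digit sum strictly decreases)
def pvGoB (fuel : Nat) (x : Int) : List Char :=
  match fuel with
  | 0 => []
  | fuel + 1 =>
    let s := pvDigitSum x
    if s ≤ 9 then PySem.Int.toChars s
    else PySem.Int.toChars s ++ '→' :: pvGoB fuel s

def reduction_chain_py_alt (n : Int) : String :=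
  let x := |n|
  if x ≤ 9 then PySem.Int.toStr x
  else String.ofList (pvGoB x.toNat x)

-- ===== PRECONDITION & SPEC =====
def Spec_reduction_chain_py (n : Int) (out : String) : Prop := out = reduction_chain_py_alt n
instance (n : Int) (out : String) : Decidable (Spec_reduction_chain_py n out) := by unfold Spec_reduction_chain_py; infer_instance

-- ===== CLAIM (what is proved, stated in full; the proofs are below) =====
def Claim_equal_reduction_chain_py : Prop := ∀ (n : Int), Dom_reduction_chain_py n → Spec_reduction_chain_py n (reduction_chain_py n)

-- ===== LEMMAS AND PROOFS =====

-- mathematical digit sum of a natural number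
def pvDsum (m : Nat) : Nat :=
  if m < 10 then m else m % 10 + pvDsum (m / 10)
decreasing_by exact Nat.div_lt_self (by omega) (by omega)

theorem pvDsum_le (m : Nat) : pvDsum m ≤ m := by
  induction m using Nat.strong_induction_on with
  | _ m ih =>
    unfold pvDsum
    split
    · omega
    · have h1 : m / 10 < m := Nat.div_lt_self (by omega) (by omega)
      have := ih (m / 10) h1
      omega

theorem pvDsum_lt (m : Nat) (h : 10 ≤ m) : pvDsum m < m := by
  unfold pvDsum
  split
  · omega
  · have h1 : m / 10 < m := Nat.div_lt_self (by omega) (by omega)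
    have := pvDsum_le (m / 10)
    omega

theorem pvDsum_small (m : Nat) (h : m < 10) : pvDsum m = m := by
  unfold pvDsum; rw [if_pos h]

theorem pvDsum_step (m : Nat) (h : 10 ≤ m) : pvDsum m = m % 10 + pvDsum (m / 10) := by
  conv_lhs => unfold pvDsum
  rw [if_neg (by omega)]

theorem pvDigitVal_digitChar (v : Nat) (h : v < 10) : pvDigitVal (Nat.digitChar v) = (v : Int) := by
  interval_cases v <;> decide

theorem pvToDigitsCore_sum (fuel : Nat) : ∀ (m : Nat) (ds : List Char), m < fuel →
    ((Nat.toDigitsCore 10 fuel m ds).map pvDigitVal).sum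
      = (pvDsum m : Int) + ((ds.map pvDigitVal).sum) := by
  induction fuel with
  | zero => intro m ds h; omega
  | succ fuel ih =>
    intro m ds h
    show ((if m / 10 = 0 then (m % 10).digitChar :: ds
            else Nat.toDigitsCore 10 fuel (m / 10) ((m % 10).digitChar :: ds)).map pvDigitVal).sum = _
    by_cases h0 : m / 10 = 0
    · have hm : m < 10 := by omega
      simp only [h0, if_true, List.map_cons, List.sum_cons,
        pvDigitVal_digitChar (m % 10) (Nat.mod_lt _ (by omega))]
      rw [pvDsum_small m hm]
      have : m % 10 = m := Nat.mod_eq_of_lt hm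
      omega
    · have hm : 10 ≤ m := by omega
      have hlt : m / 10 < fuel := by
        have := Nat.div_lt_self (show 0 < m by omega) (show 1 < 10 by omega)
        omega
      rw [if_neg h0, ih (m / 10) _ hlt]
      simp only [List.map_cons, List.sum_cons,
        pvDigitVal_digitChar (m % 10) (Nat.mod_lt _ (by omega))]
      rw [pvDsum_step m hm]
      push_cast
      ring

theorem pvDigitSum_eq (x : Int) (hx : 0 ≤ x) : pvDigitSum x = (pvDsum x.toNat : Int) := by
  unfold pvDigitSum
  have : PySem.Int.toChars x = Nat.toDigits 10 x.toNat := by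
    unfold PySem.Int.toChars
    rw [if_neg (by omega)]
  rw [this]
  unfold Nat.toDigits
  rw [pvToDigitsCore_sum (x.toNat + 1) x.toNat [] (by omega)]
  simp

theorem pvDigitSum_nonneg (x : Int) (hx : 0 ≤ x) : 0 ≤ pvDigitSum x := by
  rw [pvDigitSum_eq x hx]; positivity

theorem pvDigitSum_lt (x : Int) (hx : 9 < x) : pvDigitSum x < x := by
  rw [pvDigitSum_eq x (by omega)]
  have h10 : 10 ≤ x.toNat := by omega
  have := pvDsum_lt x.toNat h10
  omega

theorem pvDigitSum_toNat_lt (x : Int) (hx : 9 < x) : (pvDigitSum x).toNat < x.toNat := by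
  have h1 := pvDigitSum_lt x hx
  have h2 := pvDigitSum_nonneg x (by omega)
  omega

-- the canonical reduction chain (list of rendered steps), well-founded on the decreasing value
def pvChain (x : Int) : List (List Char) :=
  if _h : 9 < x then
    if _hs : 9 < pvDigitSum x then PySem.Int.toChars (pvDigitSum x) :: pvChain (pvDigitSum x)
    else [PySem.Int.toChars (pvDigitSum x)]
  else []
termination_by x.toNat
decreasing_by exact pvDigitSum_toNat_lt x _h

theorem pvChain_ne_nil (x : Int) (h : 9 < x) : pvChain x ≠ [] := by
  unfold pvChain
  rw [dif_pos h]
  split <;> simp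

theorem pvLoopA_done (fuel : Nat) (x : Int) (steps : List String) (h : ¬ 9 < x) :
    pvLoopA fuel x steps = steps := by
  cases fuel with
  | zero => rfl
  | succ fuel => simp [pvLoopA, h]

theorem pvLoopA_correct (fuel : Nat) : ∀ (x : Int) (steps : List String), 9 < x → x.toNat ≤ fuel →
    pvLoopA fuel x steps = steps ++ (pvChain x).map String.ofList := by
  induction fuel with
  | zero => intro x steps hx hf; omega
  | succ fuel ih =>
    intro x steps hx hf
    rw [pvLoopA, if_pos hx]
    rw [pvChain, dif_pos hx]
    by_cases hs : 9 < pvDigitSum x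
    · rw [dif_pos hs]
      rw [ih (pvDigitSum x) _ hs (by have := pvDigitSum_toNat_lt x hx; omega)]
      simp [PySem.Int.toStr]
    · rw [dif_neg hs]
      rw [pvLoopA_done fuel _ _ hs]
      simp [PySem.Int.toStr]

theorem pvGoB_correct (fuel : Nat) : ∀ (x : Int), 9 < x → x.toNat ≤ fuel →
    pvGoB fuel x = PySem.Chars.join ['→'] (pvChain x) := by
  induction fuel with
  | zero => intro x hx hf; omega
  | succ fuel ih =>
    intro x hx hf
    rw [pvGoB]
    rw [pvChain, dif_pos hx]
    by_cases hs : 9 < pvDigitSum x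
    · rw [dif_pos hs, if_neg (by omega)]
      rw [ih (pvDigitSum x) hs (by have := pvDigitSum_toNat_lt x hx; omega)]
      have hne := pvChain_ne_nil (pvDigitSum x) hs
      cases hcs : pvChain (pvDigitSum x) with
      | nil => exact absurd hcs hne
      | cons b rest =>
        show _ = PySem.Chars.join ['→'] (PySem.Int.toChars (pvDigitSum x) :: b :: rest)
        simp [PySem.Chars.join, List.intercalate]
    · rw [dif_neg hs, if_pos (by omega)]
      simp [PySem.Chars.join, List.intercalate]

-- ===== VERDICT (by name: the statement is the Claim_ definition above) =====
theorem reduction_chain_py_spec : Claim_equal_reduction_chain_py := by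
  intro n _
  unfold Spec_reduction_chain_py reduction_chain_py reduction_chain_py_alt
  by_cases h : |n| ≤ 9
  · rw [if_pos h, if_pos h]
  · rw [if_neg h, if_neg h]
    have hx : 9 < |n| := by omega
    rw [pvLoopA_correct |n|.toNat |n| [] hx le_rfl,
        pvGoB_correct |n|.toNat |n| hx le_rfl]
    unfold PySem.Str.join
    congr 1
    rw [List.nil_append]
    have : (String.toList "→") = ['→'] := by decide
    rw [this]
    congr 1
    simp [List.map_map, Function.comp_def]
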